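-- pv_equiv track=rewrite | github.com/BartekDomanowski/PPPD | 2019-IAD-07.py | przeciecie
-- ===== SOURCE A (Python) =====
-- def przeciecie(zbiorA: list[int], zbiorB: list[int]) -> list[int]:
--     ostatnia_indeks_wspolny: int = -1
--     ostatni_indeks: int = min(len(zbiorA), len(zbiorB))
--     for i in range(ostatni_indeks - 1, 0, -1):
--         if zbiorA[i] > 0 and zbiorB[i] > 0:
--             ostatnia_indeks_wspolny = i
--             break
--     if ostatnia_indeks_wspolny == -1:
--         return []
--     lista_przeciecia: list[int] = [0] * (ostatnia_indeks_wspolny + 1)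
--     for i in range(ostatnia_indeks_wspolny + 1):
--         lista_przeciecia[i] = min(zbiorA[i], zbiorB[i])
--     return lista_przeciecia
-- ===== SOURCE B (Python) =====
-- def przeciecie(zbiorA: list[int], zbiorB: list[int]) -> list[int]:
--     n = min(len(zbiorA), len(zbiorB))
--     acc = []
--     cut = -1
--     for i in range(n):
--         acc.append(min(zbiorA[i], zbiorB[i]))
--         if i >= 1 and zbiorA[i] > 0 and zbiorB[i] > 0:
--             cut = i
--     if cut == -1:
--         return []
--     return acc[:cut + 1]
-- ===== Notes on version B (the rewrite author's own statement) =====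
-- stated objective: simpler
-- what changed: Replaces A's reverse scan for the cutoff followed by a preallocate-and-assign build loop with one forward pass that accumulates element-wise minima while tracking the last mutual-positive index (index 0 excluded), then slices.
import Mathlib
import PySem

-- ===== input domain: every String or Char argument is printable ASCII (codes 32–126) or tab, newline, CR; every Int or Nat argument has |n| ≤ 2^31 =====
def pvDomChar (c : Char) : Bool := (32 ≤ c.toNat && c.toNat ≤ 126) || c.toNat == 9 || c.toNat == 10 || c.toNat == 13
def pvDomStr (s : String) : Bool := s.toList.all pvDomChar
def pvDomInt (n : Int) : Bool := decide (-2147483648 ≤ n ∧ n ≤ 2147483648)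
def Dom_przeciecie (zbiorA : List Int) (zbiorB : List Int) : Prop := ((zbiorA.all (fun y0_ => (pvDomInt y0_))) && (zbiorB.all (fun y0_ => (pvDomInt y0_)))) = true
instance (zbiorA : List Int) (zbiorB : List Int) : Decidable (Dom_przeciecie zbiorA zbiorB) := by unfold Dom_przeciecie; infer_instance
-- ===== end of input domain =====

-- B replaces A's reverse cutoff scan + preallocate/assign build with one forward pass
-- accumulating minima and tracking the last mutual-positive index (objective: simpler).


-- ===== PORT A =====
-- A's first loop: 'for i in range(ostatni_indeks-1, 0, -1): if A[i]>0 and B[i]>0: break'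
def pvCutLoopA (zbiorA zbiorB : List Int) : List Int → Int
  | [] => -1
  | i :: rest =>
    if PySem.List.pyGetD zbiorA i 0 > 0 ∧ PySem.List.pyGetD zbiorB i 0 > 0 then i
    else pvCutLoopA zbiorA zbiorB rest

def przeciecie (zbiorA : List Int) (zbiorB : List Int) : List Int :=
  let ostatni_indeks : Int := min (zbiorA.length : Int) (zbiorB.length : Int)
  let ostatnia_indeks_wspolny : Int :=
    pvCutLoopA zbiorA zbiorB (PySem.List.pyRange (ostatni_indeks - 1) 0 (-1))
  if ostatnia_indeks_wspolny = -1 then []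
  else
    -- 'lista = [0]*(cut+1); for i in range(cut+1): lista[i] = min(A[i], B[i])'
    (PySem.List.pyRange 0 (ostatnia_indeks_wspolny + 1) 1).foldl
      (fun l i => l.set i.toNat (min (PySem.List.pyGetD zbiorA i 0) (PySem.List.pyGetD zbiorB i 0)))
      (List.replicate (ostatnia_indeks_wspolny + 1).toNat 0)

-- ===== PORT B =====
def przeciecie_alt (zbiorA : List Int) (zbiorB : List Int) : List Int :=
  let n : Int := min (zbiorA.length : Int) (zbiorB.length : Int)
  let st : List Int × Int :=
    (PySem.List.pyRange 0 n 1).foldl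
      (fun (st : List Int × Int) i =>
        (st.1 ++ [min (PySem.List.pyGetD zbiorA i 0) (PySem.List.pyGetD zbiorB i 0)],
         if 1 ≤ i ∧ PySem.List.pyGetD zbiorA i 0 > 0 ∧ PySem.List.pyGetD zbiorB i 0 > 0 then i
         else st.2))
      ([], -1)
  if st.2 = -1 then [] else PySem.List.slice st.1 none (some (st.2 + 1))

-- ===== PRECONDITION & SPEC =====
def Spec_przeciecie (zbiorA : List Int) (zbiorB : List Int) (out : List Int) : Prop := out = przeciecie_alt zbiorA zbiorB
instance (zbiorA : List Int) (zbiorB : List Int) (out : List Int) : Decidable (Spec_przeciecie zbiorA zbiorB out) := by unfold Spec_przeciecie; infer_instance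

-- ===== CLAIM (what is proved, stated in full; the proofs are below) =====
def Claim_equal_przeciecie : Prop := ∀ (zbiorA : List Int) (zbiorB : List Int), Dom_przeciecie zbiorA zbiorB → Spec_przeciecie zbiorA zbiorB (przeciecie zbiorA zbiorB)

-- ===== LEMMAS AND PROOFS =====

-- pair fold splits into two independent folds
theorem pv_foldl_prod {α : Type} (g : List Int → α → List Int) (h : Int → α → Int) :
    ∀ (l : List α) (a : List Int) (b : Int),
      l.foldl (fun (st : List Int × Int) i => (g st.1 i, h st.2 i)) (a, b)
        = (l.foldl g a, l.foldl h b)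
  | [], a, b => rfl
  | x :: xs, a, b => by
    simp [List.foldl_cons]
    exact pv_foldl_prod g h xs (g a x) (h b x)

-- find-first on the reversed list = keep-last fold on the list
theorem pv_find_reverse (p : Int → Prop) [DecidablePred p] (zbiorA zbiorB : List Int)
    (hp : ∀ i, p i ↔ (PySem.List.pyGetD zbiorA i 0 > 0 ∧ PySem.List.pyGetD zbiorB i 0 > 0))
    (l : List Int) :
    pvCutLoopA zbiorA zbiorB l.reverse
      = l.foldl (fun c i => if p i then i else c) (-1) := by
  induction l using List.reverseRecOn with
  | nil => rfl
  | append_singleton xs x ih =>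
    simp only [List.reverse_append, List.reverse_singleton, List.singleton_append,
      List.foldl_append, List.foldl_cons, List.foldl_nil, pvCutLoopA]
    by_cases hx : p x
    · rw [if_pos ((hp x).mp hx), if_pos hx]
    · rw [if_neg (fun h => hx ((hp x).mpr h)), if_neg hx, ih]

-- the keep-last fold over a range of indices ≥ 1 gives -1 or an element of the range
theorem pv_fold_last_mem (p : Int → Int → Prop) [∀ c i, Decidable (p c i)] :
    ∀ (l : List Int) (c : Int), (l.foldl (fun c i => if p c i then i else c) c = c)
      ∨ (l.foldl (fun c i => if p c i then i else c) c) ∈ l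
  | [], c => Or.inl rfl
  | x :: xs, c => by
    simp only [List.foldl_cons, List.mem_cons]
    by_cases hx : p c x
    · rw [if_pos hx]
      rcases pv_fold_last_mem p xs x with h | h
      · exact Or.inr (Or.inl h)
      · exact Or.inr (Or.inr h)
    · rw [if_neg hx]
      rcases pv_fold_last_mem p xs c with h | h
      · exact Or.inl h
      · exact Or.inr (Or.inr h)

-- the assign loop of A over range(m) turns the scratch list into the mapped prefix
theorem pv_set_loop (f : Int → Int) :
    ∀ (m : Nat) (l : List Int), m ≤ l.length →
      (PySem.List.pyRange 0 (m : Int) 1).foldl (fun l i => l.set i.toNat (f i)) l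
        = (PySem.List.pyRange 0 (m : Int) 1).map f ++ l.drop m
  | 0, l, _ => by simp [PySem.List.pyRange_one_eq_nil]
  | m + 1, l, hm => by
    have h1 : ((m : Int) + 1) = ((m : Nat) + 1 : Nat) := by push_cast; ring
    rw [show ((m + 1 : Nat) : Int) = (m : Int) + 1 by push_cast; ring,
      PySem.List.pyRange_one_succ_right (by positivity)]
    rw [List.foldl_append, List.map_append, pv_set_loop f m l (by omega)]
    simp only [List.foldl_cons, List.foldl_nil, List.map_cons, List.map_nil]
    have hlen : ((PySem.List.pyRange 0 (m : Int) 1).map f).length = m := by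
      simp [PySem.List.length_pyRange_one]
    have hdrop : l.drop m = l[m]! :: l.drop (m + 1) := by
      rw [List.getElem!_eq_getElem?_getD, List.getElem?_eq_getElem (by omega),
        Option.getD_some]
      exact List.drop_eq_getElem_cons (by omega)
    rw [hdrop, show ((m : Int).toNat) = m by omega,
      List.set_append_right _ _ (by omega), hlen]
    simp



-- === main equivalence ===
theorem pv_main (zbiorA zbiorB : List Int) :
    przeciecie zbiorA zbiorB = przeciecie_alt zbiorA zbiorB := by
  set n : Int := min (zbiorA.length : Int) (zbiorB.length : Int) with hn
  have hn0 : 0 ≤ n := by rw [hn]; exact le_min (by positivity) (by positivity)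
  set f : Int → Int := fun i => min (PySem.List.pyGetD zbiorA i 0) (PySem.List.pyGetD zbiorB i 0) with hf
  set p : Int → Prop := fun i => PySem.List.pyGetD zbiorA i 0 > 0 ∧ PySem.List.pyGetD zbiorB i 0 > 0 with hp
  set cutA : Int := pvCutLoopA zbiorA zbiorB (PySem.List.pyRange (n - 1) 0 (-1)) with hcutA
  set cutB : Int := (PySem.List.pyRange 0 n 1).foldl (fun c i => if 1 ≤ i ∧ p i then i else c) (-1) with hcutBdef
  set accB : List Int := (PySem.List.pyRange 0 n 1).foldl (fun acc i => acc ++ [f i]) [] with haccB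
  have hA : przeciecie zbiorA zbiorB
      = if cutA = -1 then []
        else (PySem.List.pyRange 0 (cutA + 1) 1).foldl
          (fun l i => l.set i.toNat (f i)) (List.replicate (cutA + 1).toNat 0) := rfl
  have hB : przeciecie_alt zbiorA zbiorB
      = if cutB = -1 then [] else PySem.List.slice accB none (some (cutB + 1)) := by
    have hpair : (PySem.List.pyRange 0 n 1).foldl
        (fun (st : List Int × Int) i =>
          (st.1 ++ [min (PySem.List.pyGetD zbiorA i 0) (PySem.List.pyGetD zbiorB i 0)],
           if 1 ≤ i ∧ PySem.List.pyGetD zbiorA i 0 > 0 ∧ PySem.List.pyGetD zbiorB i 0 > 0 then i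
           else st.2)) ([], -1) = (accB, cutB) :=
      pv_foldl_prod
        (fun a i => a ++ [min (PySem.List.pyGetD zbiorA i 0) (PySem.List.pyGetD zbiorB i 0)])
        (fun b i => if 1 ≤ i ∧ PySem.List.pyGetD zbiorA i 0 > 0 ∧ PySem.List.pyGetD zbiorB i 0 > 0 then i else b)
        (PySem.List.pyRange 0 n 1) [] (-1)
    show (if ((PySem.List.pyRange 0 n 1).foldl _ ([], -1) : List Int × Int).2 = -1 then []
          else PySem.List.slice ((PySem.List.pyRange 0 n 1).foldl _ ([], -1) : List Int × Int).1
            none (some (((PySem.List.pyRange 0 n 1).foldl _ ([], -1) : List Int × Int).2 + 1))) = _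
    rw [hpair]
  -- A's reverse scan = keep-last fold over the forward index range 1..n-1
  have hplain : cutA = (PySem.List.pyRange 1 n 1).foldl (fun c i => if p i then i else c) (-1) := by
    have hrev : PySem.List.pyRange (n - 1) 0 (-1) = (PySem.List.pyRange 1 n 1).reverse := by
      have := PySem.List.pyRange_neg_one_eq_reverse (n - 1) 0
      simpa using this
    rw [hcutA, hrev, pv_find_reverse p zbiorA zbiorB (fun i => by rw [hp])]
  -- B's cut fold: index 0 never fires, and for i ≥ 1 the guard is redundant
  have hBA : cutB = cutA := by
    rw [hplain, hcutBdef]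
    by_cases h1 : 1 ≤ n
    · rw [PySem.List.pyRange_one_append 0 1 n (by omega) h1, List.foldl_append,
        show PySem.List.pyRange 0 1 1 = [0] from PySem.List.pyRange_one_singleton 0]
      simp only [List.foldl_cons, List.foldl_nil]
      rw [if_neg (by simp)]
      exact PySem.List.foldl_congr_mem _ _ _ _ (fun c i hi => by
        have h1i : (1:Int) ≤ i := (PySem.List.mem_pyRange_one.mp hi).1
        by_cases hpi : p i <;> simp [hpi, h1i])
    · rw [PySem.List.pyRange_one_eq_nil (a := 1) (by omega),
        PySem.List.pyRange_one_eq_nil (a := 0) (by omega)]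
      rfl
  -- bounds on cutA
  have hmem : cutA = -1 ∨ (1 ≤ cutA ∧ cutA < n) := by
    rcases pv_fold_last_mem (fun _ i => p i) (PySem.List.pyRange 1 n 1) (-1) with h | h
    · exact Or.inl (by rw [hplain]; exact h)
    · right
      rw [hplain]
      exact PySem.List.mem_pyRange_one.mp h
  rcases hmem with hc | ⟨hc1, hc2⟩
  · rw [hA, hB, hBA, if_pos hc, if_pos hc]
  · have hne : cutA ≠ -1 := by omega
    rw [hA, hB, hBA, if_neg hne, if_neg hne]
    -- A side: the set loop fills the mapped prefix
    have hm : (((cutA + 1).toNat : Nat) : Int) = cutA + 1 := by omega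
    have hAside : (PySem.List.pyRange 0 (cutA + 1) 1).foldl
        (fun l i => l.set i.toNat (f i)) (List.replicate (cutA + 1).toNat 0)
        = (PySem.List.pyRange 0 (cutA + 1) 1).map f := by
      have := pv_set_loop f (cutA + 1).toNat (List.replicate (cutA + 1).toNat 0) (by simp)
      rw [hm] at this
      simpa using this
    rw [hAside]
    -- B side: slicing the full mapped range to cutA+1
    rw [haccB, PySem.List.foldl_append_singleton_eq_map, List.nil_append]
    rw [show (cutA + 1) = (((cutA + 1).toNat : Nat) : Int) from hm.symm,
      PySem.List.slice_to_natCast]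
    rw [PySem.List.pyRange_one_append 0 (cutA + 1) n (by omega) (by omega),
      List.map_append, List.take_append_of_le_length (by
        simp [PySem.List.length_pyRange_one])]
    rw [List.take_of_length_le (by simp [PySem.List.length_pyRange_one])]
    rw [hm]

-- ===== VERDICT (by name: the statement is the Claim_ definition above) =====
theorem przeciecie_spec : Claim_equal_przeciecie := by
  intro zbiorA zbiorB _
  unfold Spec_przeciecie
  exact pv_main zbiorA zbiorB
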